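-- pv_equiv track=rewrite | github.com/flowritecom/flow-merge | flow_merge/lib/model/metadata/file_validators/_pytorch_bin.py | has_pytorch_bin_files
-- ===== SOURCE A (Python) =====
-- def has_pytorch_bin_files(file_list):
--     pytorch_bin_files = [
--         file
--         for file in file_list
--         if file.endswith(".bin") and not file.endswith(".index.json")
--     ]
--     num_shards = len(pytorch_bin_files)
--     if not num_shards:
--         return False
--
--     if num_shards == 1 and "pytorch_model.bin" in file_list:
--         return True
--
--     return all(
--         f"pytorch_model-{i:05d}-of-{num_shards:05d}.bin" in file_list
--         for i in range(1, num_shards + 1)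
--     )
-- ===== SOURCE B (Python) =====
-- def has_pytorch_bin_files(file_list):
--     bins = [f for f in file_list if f.endswith(".bin")]
--     n = len(bins)
--     if n == 0:
--         return False
--     if n == 1 and "pytorch_model.bin" in file_list:
--         return True
--     suffix = "-of-" + str(n).zfill(5) + ".bin"
--     mids = set()
--     for name in bins:
--         if not (name.startswith("pytorch_model-") and name.endswith(suffix)):
--             return False
--         mids.add(name[14:len(name) - len(suffix)])
--     return mids == {str(i).zfill(5) for i in range(1, n + 1)}
-- ===== Notes on version B (the rewrite author's own statement) =====
-- stated objective: alternative
-- what changed: Instead of generating each expected shard name and probing the file list for it (a quadratic generate-and-scan), B makes one pass over the .bin files, parsing each name against the prefix and the '-of-<n padded>.bin' suffix, collects the middle index fields into a set, and compares that set with the expected set of zero-padded indices.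
import Mathlib
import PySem

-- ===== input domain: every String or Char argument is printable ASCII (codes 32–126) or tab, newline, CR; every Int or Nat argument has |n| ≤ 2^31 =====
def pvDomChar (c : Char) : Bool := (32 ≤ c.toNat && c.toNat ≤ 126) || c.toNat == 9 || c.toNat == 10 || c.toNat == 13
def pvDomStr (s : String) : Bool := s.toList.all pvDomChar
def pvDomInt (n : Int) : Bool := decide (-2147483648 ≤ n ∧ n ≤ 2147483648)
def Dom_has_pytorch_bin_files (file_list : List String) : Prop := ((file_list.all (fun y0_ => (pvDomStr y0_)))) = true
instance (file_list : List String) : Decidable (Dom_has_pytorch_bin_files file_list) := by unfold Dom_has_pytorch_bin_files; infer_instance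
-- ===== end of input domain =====

-- B replaces A's generate-each-expected-name-and-probe scan by a single parsing pass over the .bin
-- files whose middle index fields are collected into a set and compared with the expected index set;
-- this file proves the two return values equal on every input.

-- ===== PORT A =====
-- format(x, '05d') for the values used here (x ≥ 1) = str(x).zfill(5); PySem.Int.toChars/PySem.Chars.zfill are exact
def pvPad5 (x : Int) : List Char := PySem.Chars.zfill (PySem.Int.toChars x) 5

-- the f-string f"pytorch_model-{i:05d}-of-{num_shards:05d}.bin", built on code points
def pvShardName (i num_shards : Int) : String :=
  String.ofList ("pytorch_model-".toList ++ pvPad5 i ++ ("-of-".toList ++ pvPad5 num_shards ++ ".bin".toList))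

def has_pytorch_bin_files (file_list : List String) : Bool :=
  let pytorch_bin_files := file_list.filter (fun file =>
    PySem.Str.endswith file ".bin" && !PySem.Str.endswith file ".index.json")
  let num_shards : Int := (pytorch_bin_files.length : Int)
  if num_shards = 0 then false
  else if num_shards = 1 ∧ file_list.contains "pytorch_model.bin" = true then true
  else (PySem.List.pyRange 1 (num_shards + 1)).all
    (fun i => file_list.contains (pvShardName i num_shards))

-- ===== PORT B =====
-- suffix = "-of-" + str(n).zfill(5) + ".bin"
def pvSuffix (n : Int) : List Char := "-of-".toList ++ pvPad5 n ++ ".bin".toList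

-- name.startswith("pytorch_model-") and name.endswith(suffix)
def pvTest (suffix : List Char) (name : String) : Bool :=
  PySem.Chars.startswith name.toList "pytorch_model-".toList &&
    PySem.Chars.endswith name.toList suffix

-- name[14 : len(name) - len(suffix)]
def pvMid (suffix : List Char) (name : String) : String :=
  String.ofList (PySem.List.slice name.toList (some 14)
    (some ((name.toList.length : Int) - (suffix.length : Int))))

-- one iteration of B's loop; `none` models the early `return False`
def pvStep (suffix : List Char) (acc : Option (PySem.Set String)) (name : String) :
    Option (PySem.Set String) :=
  match acc with
  | none => none
  | some mids => if pvTest suffix name then some (PySem.Set.add mids (pvMid suffix name)) else none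

def has_pytorch_bin_files_alt (file_list : List String) : Bool :=
  let bins := file_list.filter (fun f => PySem.Str.endswith f ".bin")
  let n : Int := (bins.length : Int)
  if n = 0 then false
  else if n = 1 ∧ file_list.contains "pytorch_model.bin" = true then true
  else
    match bins.foldl (pvStep (pvSuffix n)) (some PySem.Set.empty) with
    | none => false
    | some mids =>
        PySem.Set.equal mids
          (PySem.Set.ofList ((PySem.List.pyRange 1 (n + 1)).map (fun i => String.ofList (pvPad5 i))))

-- ===== PRECONDITION & SPEC =====
def Spec_has_pytorch_bin_files (file_list : List String) (out : Bool) : Prop :=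
  out = has_pytorch_bin_files_alt file_list
instance (file_list : List String) (out : Bool) : Decidable (Spec_has_pytorch_bin_files file_list out) := by
  unfold Spec_has_pytorch_bin_files; infer_instance

-- ===== CLAIM (what is proved, stated in full; the proofs are below) =====
def Claim_equal_has_pytorch_bin_files : Prop := ∀ (file_list : List String), Dom_has_pytorch_bin_files file_list → Spec_has_pytorch_bin_files file_list (has_pytorch_bin_files file_list)

-- ===== LEMMAS AND PROOFS =====

-- the decimal digits of n, most significant first (what Nat.toDigits 10 computes)
def pvDecChars (n : Nat) : List Char :=
  if h : n < 10 then [Nat.digitChar n]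
  else pvDecChars (n / 10) ++ [Nat.digitChar (n % 10)]
decreasing_by exact Nat.div_lt_self (by omega) (by omega)

theorem pvDecChars_lt {n : Nat} (h : n < 10) : pvDecChars n = [Nat.digitChar n] := by
  rw [pvDecChars, dif_pos h]

theorem pvDecChars_ge {n : Nat} (h : ¬ n < 10) :
    pvDecChars n = pvDecChars (n / 10) ++ [Nat.digitChar (n % 10)] := by
  conv_lhs => rw [pvDecChars]
  rw [dif_neg h]

theorem pv_toDigitsCore_eq : ∀ (f n : Nat) (acc : List Char), n < f →
    Nat.toDigitsCore 10 f n acc = pvDecChars n ++ acc := by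
  intro f
  induction f with
  | zero => intro n acc h; omega
  | succ f ih =>
    intro n acc h
    by_cases h10 : n / 10 = 0
    · have hlt : n < 10 := by
        by_contra hc
        push_neg at hc
        have := (Nat.one_le_div_iff (by norm_num)).mpr hc
        omega
      simp only [Nat.toDigitsCore]
      rw [if_pos h10, pvDecChars_lt hlt, Nat.mod_eq_of_lt hlt]
      rfl
    · have h9 : ¬ n < 10 := fun hc => h10 (Nat.div_eq_of_lt hc)
      have hdiv : n / 10 < n := Nat.div_lt_self (by omega) (by omega)
      simp only [Nat.toDigitsCore]
      rw [if_neg h10, ih (n / 10) _ (by omega), pvDecChars_ge h9]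
      simp

theorem pv_toChars_pos (i : Int) (h : 0 < i) : PySem.Int.toChars i = pvDecChars i.toNat := by
  have h' : ¬ i < 0 := by omega
  simp only [PySem.Int.toChars, if_neg h']
  rw [Nat.toDigits, pv_toDigitsCore_eq _ _ _ (Nat.lt_succ_self _)]
  simp

theorem pv_digitChar_ne (d : Nat) (h : d < 10) :
    (Nat.digitChar d = '0' ↔ d = 0) ∧ Nat.digitChar d ≠ '+' ∧ Nat.digitChar d ≠ '-' := by
  interval_cases d <;> decide

theorem pv_digitChar_inj (a b : Nat) (ha : a < 10) (hb : b < 10)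
    (h : Nat.digitChar a = Nat.digitChar b) : a = b := by
  revert h; interval_cases a <;> interval_cases b <;> decide

theorem pv_decChars_ne_nil (n : Nat) : pvDecChars n ≠ [] := by
  rw [pvDecChars]; split_ifs <;> simp

theorem pv_decChars_head (n : Nat) :
    ∃ d t, d < 10 ∧ pvDecChars n = Nat.digitChar d :: t ∧ (0 < n → d ≠ 0) := by
  induction n using Nat.strong_induction_on with
  | _ n ih =>
    by_cases h : n < 10
    · exact ⟨n, [], h, pvDecChars_lt h, fun hp => by omega⟩
    · have hpos : 0 < n / 10 := Nat.div_pos (by omega) (by omega)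
      obtain ⟨d, t, hd, heq, hne⟩ := ih (n / 10) (Nat.div_lt_self (by omega) (by omega))
      refine ⟨d, t ++ [Nat.digitChar (n % 10)], hd, ?_, fun _ => hne hpos⟩
      rw [pvDecChars_ge h, heq]
      rfl

theorem pv_decChars_inj (m : Nat) : ∀ n, pvDecChars m = pvDecChars n → m = n := by
  induction m using Nat.strong_induction_on with
  | _ m ih =>
    intro n h
    by_cases hm : m < 10 <;> by_cases hn : n < 10
    · rw [pvDecChars_lt hm, pvDecChars_lt hn] at h
      exact pv_digitChar_inj m n hm hn (by simpa using h)
    · exfalso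
      rw [pvDecChars_lt hm, pvDecChars_ge hn] at h
      rcases hq : pvDecChars (n / 10) with _ | ⟨a, l⟩
      · exact pv_decChars_ne_nil _ hq
      · rw [hq] at h
        simp at h
    · exfalso
      rw [pvDecChars_ge hm, pvDecChars_lt hn] at h
      rcases hq : pvDecChars (m / 10) with _ | ⟨a, l⟩
      · exact pv_decChars_ne_nil _ hq
      · rw [hq] at h
        simp at h
    · rw [pvDecChars_ge hm, pvDecChars_ge hn] at h
      obtain ⟨ha, hb⟩ := List.append_inj' h (by rfl)
      have h3 : m / 10 = n / 10 :=
        ih (m / 10) (Nat.div_lt_self (by omega) (by omega)) _ ha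
      have h4 : m % 10 = n % 10 :=
        pv_digitChar_inj _ _ (Nat.mod_lt _ (by omega)) (Nat.mod_lt _ (by omega)) (by simpa using hb)
      omega

theorem pv_rep_cancel : ∀ (p q : Nat) (x y : List Char),
    x.head? ≠ some '0' → y.head? ≠ some '0' →
    List.replicate p '0' ++ x = List.replicate q '0' ++ y → x = y := by
  intro p
  induction p with
  | zero =>
    intro q x y hx0 hy0 h
    cases q with
    | zero => simpa using h
    | succ q =>
      exfalso
      apply hx0
      rw [List.replicate_succ] at h
      simp only [List.replicate_zero, List.nil_append, List.cons_append] at h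
      rw [h]
      rfl
  | succ p ih =>
    intro q x y hx0 hy0 h
    cases q with
    | zero =>
      exfalso
      apply hy0
      rw [List.replicate_succ] at h
      simp only [List.replicate_zero, List.nil_append, List.cons_append] at h
      rw [← h]
      rfl
    | succ q =>
      rw [List.replicate_succ, List.replicate_succ] at h
      simp only [List.cons_append, List.cons.injEq] at h
      exact ih q x y hx0 hy0 h.2

theorem pv_zfill5 (d : Nat) (t : List Char) (hd : d < 10) :
    PySem.Chars.zfill (Nat.digitChar d :: t) 5 =
      List.replicate (5 - (Nat.digitChar d :: t).length) '0' ++ (Nat.digitChar d :: t) := by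
  have hp := (pv_digitChar_ne d hd).2.1
  have hm := (pv_digitChar_ne d hd).2.2
  rw [PySem.Chars.zfill]
  split_ifs with h5 hpm
  · have hz : 5 - (Nat.digitChar d :: t).length = 0 := by
      simp only [List.length_cons] at h5 ⊢
      omega
    rw [hz]
    simp
  · exact absurd hpm (by simp [hp, hm])
  · simp only [List.length_cons]
    congr 1

theorem pv_pad5_spec (i : Int) (hi : 0 < i) :
    ∃ d t, d < 10 ∧ d ≠ 0 ∧ pvDecChars i.toNat = Nat.digitChar d :: t ∧
      pvPad5 i = List.replicate (5 - (pvDecChars i.toNat).length) '0' ++ pvDecChars i.toNat := by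
  obtain ⟨d, t, hd, heq, hne⟩ := pv_decChars_head i.toNat
  refine ⟨d, t, hd, hne (by omega), heq, ?_⟩
  unfold pvPad5
  rw [pv_toChars_pos i hi, heq, pv_zfill5 d t hd]

theorem pv_pad5_len (i : Int) : 5 ≤ (pvPad5 i).length := by
  unfold pvPad5
  have := PySem.Chars.length_zfill (PySem.Int.toChars i) 5
  omega

theorem pv_pad5_inj (i j : Int) (hi : 0 < i) (hj : 0 < j) (h : pvPad5 i = pvPad5 j) : i = j := by
  obtain ⟨d1, t1, hd1, hz1, he1, hr1⟩ := pv_pad5_spec i hi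
  obtain ⟨d2, t2, hd2, hz2, he2, hr2⟩ := pv_pad5_spec j hj
  rw [hr1, hr2] at h
  have hx0 : (pvDecChars i.toNat).head? ≠ some '0' := by
    rw [he1]
    intro hc
    exact hz1 ((pv_digitChar_ne d1 hd1).1.mp (by simpa using hc))
  have hy0 : (pvDecChars j.toNat).head? ≠ some '0' := by
    rw [he2]
    intro hc
    exact hz2 ((pv_digitChar_ne d2 hd2).1.mp (by simpa using hc))
  have := pv_decChars_inj _ _ (pv_rep_cancel _ _ _ _ hx0 hy0 h)
  omega

theorem pv_toList_mk (l : List Char) : (String.ofList l).toList = l := by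
  simp

theorem pv_mk_toList (s : String) : String.ofList s.toList = s := by
  simp

theorem pv_name_toList (i n : Int) :
    (pvShardName i n).toList = ("pytorch_model-".toList ++ pvPad5 i) ++ pvSuffix n := by
  simp [pvShardName, pvSuffix]

theorem pv_name_inj (i j n : Int) (hi : 0 < i) (hj : 0 < j)
    (h : pvShardName i n = pvShardName j n) : i = j := by
  have h' := congrArg String.toList h
  rw [pv_name_toList, pv_name_toList] at h'
  exact pv_pad5_inj i j hi hj (List.append_cancel_left (List.append_cancel_right h'))

theorem pv_filter_eq (fl : List String) :
    fl.filter (fun file => PySem.Str.endswith file ".bin" && !PySem.Str.endswith file ".index.json") =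
      fl.filter (fun f => PySem.Str.endswith f ".bin") := by
  apply List.filter_congr
  intro f _
  by_cases hb : PySem.Str.endswith f ".bin" = true
  · have hj : PySem.Str.endswith f ".index.json" = false := by
      by_contra hc
      have hc' : PySem.Chars.endswith f.toList ".index.json".toList = true := by
        simpa using (Bool.not_eq_false _).mp hc
      have hb' : PySem.Chars.endswith f.toList ".bin".toList = true := hb
      have s1 : ".bin".toList <:+ f.toList := (PySem.Chars.endswith_iff _ _).mp hb'
      have s2 : ".index.json".toList <:+ f.toList := (PySem.Chars.endswith_iff _ _).mp hc'
      have s3 : (['j', 's', 'o', 'n'] : List Char) <:+ ".index.json".toList := by decide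
      have s4 := s3.trans s2
      have s5 : ".bin".toList = (['.', 'b', 'i', 'n'] : List Char) := by decide
      rw [s5] at s1
      rcases List.suffix_or_suffix_of_suffix s1 s4 with hs | hs
      · exact absurd (hs.eq_of_length rfl) (by decide)
      · exact absurd (hs.eq_of_length rfl) (by decide)
    rw [hb, hj]
    rfl
  · rw [Bool.not_eq_true] at hb
    rw [hb]
    rfl

theorem pv_loop_none (suffix : List Char) (l : List String) :
    l.foldl (pvStep suffix) none = none := by
  induction l with
  | nil => rfl
  | cons b bs ih => simpa [pvStep] using ih

theorem pv_loop_aux (suffix : List Char) :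
    ∀ (bins : List String) (s : PySem.Set String),
      bins.foldl (pvStep suffix) (some s) =
        if bins.all (pvTest suffix)
        then some ((bins.map (pvMid suffix)).foldl PySem.Set.add s)
        else none := by
  intro bins
  induction bins with
  | nil => intro s; simp
  | cons b bs ih =>
    intro s
    by_cases hb : pvTest suffix b = true
    · simp only [List.foldl_cons, List.map_cons, List.all_cons, hb, Bool.true_and]
      rw [show pvStep suffix (some s) b = some (PySem.Set.add s (pvMid suffix b)) from by
        simp [pvStep, hb]]
      exact ih _
    · rw [Bool.not_eq_true] at hb
      simp only [List.foldl_cons, List.all_cons, hb, Bool.false_and, Bool.false_eq_true, if_false]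
      rw [show pvStep suffix (some s) b = none from by simp [pvStep, hb]]
      exact pv_loop_none suffix bs

theorem pv_loop (suffix : List Char) (bins : List String) :
    bins.foldl (pvStep suffix) (some PySem.Set.empty) =
      if bins.all (pvTest suffix)
      then some (PySem.Set.ofList (bins.map (pvMid suffix)))
      else none := by
  rw [pv_loop_aux suffix bins PySem.Set.empty]
  by_cases hall : bins.all (pvTest suffix) = true
  · rw [if_pos hall, if_pos hall, PySem.Set.ofList_eq_foldl]
    rfl
  · rw [Bool.not_eq_true] at hall
    rw [if_neg (by simp [hall]), if_neg (by simp [hall])]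

theorem pv_test_shard (i n : Int) : pvTest (pvSuffix n) (pvShardName i n) = true := by
  unfold pvTest
  rw [pv_name_toList, Bool.and_eq_true]
  constructor
  · apply (PySem.Chars.startswith_iff _ _).mpr
    rw [List.append_assoc]
    exact List.prefix_append _ _
  · apply (PySem.Chars.endswith_iff _ _).mpr
    exact List.suffix_append _ _

theorem pv_mid_shard (i n : Int) :
    pvMid (pvSuffix n) (pvShardName i n) = String.ofList (pvPad5 i) := by
  have hP : ("pytorch_model-".toList).length = 14 := by decide
  have key : PySem.List.slice (pvShardName i n).toList (some 14)
      (some (((pvShardName i n).toList.length : Int) - ((pvSuffix n).length : Int))) = pvPad5 i := by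
    rw [pv_name_toList]
    have hcast : ((("pytorch_model-".toList ++ pvPad5 i) ++ pvSuffix n).length : Int)
        - ((pvSuffix n).length : Int) = ((14 + (pvPad5 i).length : Nat) : Int) := by
      simp only [List.length_append, hP]
      push_cast
      ring
    rw [hcast, show (14 : Int) = ((14 : Nat) : Int) from rfl, PySem.List.slice_natCast]
    rw [show (14 + (pvPad5 i).length) - 14 = (pvPad5 i).length from by omega]
    rw [List.append_assoc, ← hP, List.drop_left]
    exact List.take_left
  unfold pvMid
  rw [key]

theorem pv_parse (n i : Int) (hi : 0 < i) (name : String)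
    (ht : pvTest (pvSuffix n) name = true)
    (hm : pvMid (pvSuffix n) name = String.ofList (pvPad5 i)) :
    name = pvShardName i n := by
  unfold pvTest at ht
  rw [Bool.and_eq_true] at ht
  have hpre : "pytorch_model-".toList <+: name.toList :=
    (PySem.Chars.startswith_iff _ _).mp ht.1
  have hsuf : pvSuffix n <:+ name.toList := (PySem.Chars.endswith_iff _ _).mp ht.2
  have hSle : (pvSuffix n).length ≤ name.toList.length := hsuf.length_le
  have hP : ("pytorch_model-".toList).length = 14 := by decide
  have hmid : PySem.List.slice name.toList (some 14)
      (some ((name.toList.length : Int) - ((pvSuffix n).length : Int))) = pvPad5 i := by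
    have h := congrArg String.toList hm
    unfold pvMid at h
    simpa [pv_toList_mk] using h
  have hcast : ((name.toList.length : Int) - ((pvSuffix n).length : Int))
      = ((name.toList.length - (pvSuffix n).length : Nat) : Int) := by omega
  rw [hcast, show (14 : Int) = ((14 : Nat) : Int) from rfl, PySem.List.slice_natCast] at hmid
  have hlen5 := pv_pad5_len i
  have hmlen := congrArg List.length hmid
  simp only [List.length_take, List.length_drop] at hmlen
  have hbig : 14 + 5 ≤ name.toList.length - (pvSuffix n).length := by omega
  have e1 : name.toList = "pytorch_model-".toList ++ name.toList.drop 14 := by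
    conv_lhs => rw [← List.take_append_drop 14 name.toList]
    congr 1
    have h := List.prefix_iff_eq_take.mp hpre
    rw [h, hP]
  have e2 : name.toList.drop 14 =
      pvPad5 i ++ name.toList.drop (name.toList.length - (pvSuffix n).length) := by
    conv_lhs => rw [← List.take_append_drop
      ((name.toList.length - (pvSuffix n).length) - 14) (name.toList.drop 14)]
    rw [hmid]
    congr 1
    rw [List.drop_drop]
    congr 1
    omega
  have e3 : name.toList.drop (name.toList.length - (pvSuffix n).length) = pvSuffix n :=
    (List.suffix_iff_eq_drop.mp hsuf).symm
  have e4 : name.toList = ("pytorch_model-".toList ++ pvPad5 i) ++ pvSuffix n := by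
    rw [e1, e2, e3, List.append_assoc]
  have e5 : name.toList = (pvShardName i n).toList := by rw [pv_name_toList]; exact e4
  have := congrArg String.ofList e5
  rwa [pv_mk_toList, pv_mk_toList] at this

theorem pv_pyRange_len (n : Nat) : (PySem.List.pyRange 1 ((n : Int) + 1)).length = n := by
  rw [PySem.List.pyRange]
  norm_num
  omega

theorem pv_pyRange_nodup (n : Nat) : (PySem.List.pyRange 1 ((n : Int) + 1)).Nodup := by
  rw [PySem.List.pyRange]
  norm_num
  split_ifs with h
  · apply List.Nodup.map
    · intro a b hab
      simp only at hab
      omega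
    · exact List.nodup_range
  · exact List.nodup_nil

theorem pv_cover {E bins : List String} (hnd : E.Nodup) (hsub : ∀ x ∈ E, x ∈ bins)
    (hlen : bins.length = E.length) : ∀ x ∈ bins, x ∈ E := by
  have h1 : E.toFinset ⊆ bins.toFinset := fun x hx =>
    List.mem_toFinset.mpr (hsub x (List.mem_toFinset.mp hx))
  have h2 : bins.toFinset.card ≤ E.toFinset.card := by
    rw [List.toFinset_card_of_nodup hnd, ← hlen]
    exact List.toFinset_card_le bins
  have heq := Finset.eq_of_subset_of_card_le h1 h2
  intro x hx
  have := heq ▸ List.mem_toFinset.mpr hx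
  exact List.mem_toFinset.mp this

theorem pv_branch (fl : List String) (bins : List String)
    (hbins : bins = fl.filter (fun f => PySem.Str.endswith f ".bin"))
    (hn : 0 < bins.length) :
    ((PySem.List.pyRange 1 ((bins.length : Int) + 1)).all
        (fun i => fl.contains (pvShardName i (bins.length : Int))) = true) ↔
      ((bins.all (pvTest (pvSuffix (bins.length : Int))) = true) ∧
        PySem.Set.equal (PySem.Set.ofList (bins.map (pvMid (pvSuffix (bins.length : Int)))))
          (PySem.Set.ofList ((PySem.List.pyRange 1 ((bins.length : Int) + 1)).map
            (fun i => String.ofList (pvPad5 i)))) = true) := by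
  constructor
  · intro hA
    rw [List.all_eq_true] at hA
    have hmem : ∀ i : Int, 1 ≤ i → i < (bins.length : Int) + 1 →
        pvShardName i (bins.length : Int) ∈ bins := by
      intro i h1 h2
      have hfl : pvShardName i (bins.length : Int) ∈ fl := by
        have := hA i (PySem.List.mem_pyRange_one.mpr ⟨h1, h2⟩)
        exact List.contains_iff_mem.mp this
      have hend : PySem.Str.endswith (pvShardName i (bins.length : Int)) ".bin" = true := by
        show PySem.Chars.endswith _ _ = true
        apply (PySem.Chars.endswith_iff _ _).mpr
        rw [pv_name_toList]
        have h1' : ".bin".toList <:+ pvSuffix (bins.length : Int) := by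
          unfold pvSuffix
          exact List.suffix_append _ _
        exact h1'.trans (List.suffix_append _ _)
      have hm : pvShardName i (bins.length : Int) ∈
          fl.filter (fun f => PySem.Str.endswith f ".bin") :=
        List.mem_filter.mpr ⟨hfl, hend⟩
      rwa [← hbins] at hm
    have hEnd : ((PySem.List.pyRange 1 ((bins.length : Int) + 1)).map
        (fun i => pvShardName i (bins.length : Int))).Nodup := by
      apply List.Nodup.map_on
      · intro x hx y hy hxy
        rw [PySem.List.mem_pyRange_one] at hx hy
        exact pv_name_inj x y _ (by omega) (by omega) hxy
      · exact pv_pyRange_nodup bins.length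
    have hElen : ((PySem.List.pyRange 1 ((bins.length : Int) + 1)).map
        (fun i => pvShardName i (bins.length : Int))).length = bins.length := by
      rw [List.length_map]
      exact pv_pyRange_len _
    have hEsub : ∀ x ∈ (PySem.List.pyRange 1 ((bins.length : Int) + 1)).map
        (fun i => pvShardName i (bins.length : Int)), x ∈ bins := by
      intro x hx
      obtain ⟨i, hi, rfl⟩ := List.mem_map.mp hx
      rw [PySem.List.mem_pyRange_one] at hi
      exact hmem i hi.1 hi.2
    have hcov := pv_cover hEnd hEsub hElen.symm
    have hbin_shard : ∀ x ∈ bins, ∃ i : Int, 1 ≤ i ∧ i < (bins.length : Int) + 1 ∧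
        x = pvShardName i (bins.length : Int) := by
      intro x hx
      obtain ⟨i, hi, hxi⟩ := List.mem_map.mp (hcov x hx)
      rw [PySem.List.mem_pyRange_one] at hi
      exact ⟨i, hi.1, hi.2, hxi.symm⟩
    constructor
    · rw [List.all_eq_true]
      intro x hx
      obtain ⟨i, h1, h2, rfl⟩ := hbin_shard x hx
      exact pv_test_shard i _
    · rw [PySem.Set.equal_iff]
      intro x
      rw [PySem.Set.mem_ofList, PySem.Set.mem_ofList]
      constructor
      · intro hx
        obtain ⟨b, hb, rfl⟩ := List.mem_map.mp hx
        obtain ⟨i, h1, h2, rfl⟩ := hbin_shard b hb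
        rw [pv_mid_shard]
        exact List.mem_map.mpr ⟨i, PySem.List.mem_pyRange_one.mpr ⟨h1, h2⟩, rfl⟩
      · intro hx
        obtain ⟨i, hi, rfl⟩ := List.mem_map.mp hx
        rw [PySem.List.mem_pyRange_one] at hi
        exact List.mem_map.mpr ⟨pvShardName i (bins.length : Int), hmem i hi.1 hi.2,
          pv_mid_shard i _⟩
  · rintro ⟨hall, heq⟩
    rw [List.all_eq_true] at hall
    rw [PySem.Set.equal_iff] at heq
    rw [List.all_eq_true]
    intro i hi
    have hi' := PySem.List.mem_pyRange_one.mp hi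
    have h1 : String.ofList (pvPad5 i) ∈ bins.map (pvMid (pvSuffix (bins.length : Int))) := by
      have hx : String.ofList (pvPad5 i) ∈ PySem.Set.ofList
          ((PySem.List.pyRange 1 ((bins.length : Int) + 1)).map
            (fun j => String.ofList (pvPad5 j))) :=
        (PySem.Set.mem_ofList _ _).mpr (List.mem_map.mpr ⟨i, hi, rfl⟩)
      exact (PySem.Set.mem_ofList _ _).mp ((heq _).mpr hx)
    obtain ⟨b, hb, hbm⟩ := List.mem_map.mp h1
    have hbshard := pv_parse (bins.length : Int) i (by omega) b (hall b hb) hbm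
    show fl.contains _ = true
    apply List.contains_iff_mem.mpr
    rw [← hbshard]
    have hbfl := hbins ▸ hb
    exact (List.mem_filter.mp hbfl).1

theorem pv_ports_eq (fl : List String) :
    has_pytorch_bin_files fl = has_pytorch_bin_files_alt fl := by
  unfold has_pytorch_bin_files has_pytorch_bin_files_alt
  simp only [pv_filter_eq]
  by_cases h0 : ((fl.filter (fun f => PySem.Str.endswith f ".bin")).length : Int) = 0
  · rw [if_pos h0, if_pos h0]
  · rw [if_neg h0, if_neg h0]
    by_cases h1 : ((fl.filter (fun f => PySem.Str.endswith f ".bin")).length : Int) = 1 ∧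
        fl.contains "pytorch_model.bin" = true
    · rw [if_pos h1, if_pos h1]
    · rw [if_neg h1, if_neg h1]
      have hn : 0 < (fl.filter (fun f => PySem.Str.endswith f ".bin")).length := by omega
      rw [pv_loop]
      have hiff := pv_branch fl _ rfl hn
      by_cases hall : (fl.filter (fun f => PySem.Str.endswith f ".bin")).all
          (pvTest (pvSuffix ((fl.filter (fun f => PySem.Str.endswith f ".bin")).length : Int))) = true
      · rw [if_pos hall]
        rw [Bool.eq_iff_iff, hiff]
        constructor
        · rintro ⟨_, h⟩; exact h
        · intro h; exact ⟨hall, h⟩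
      · rw [if_neg hall]
        show _ = false
        rw [Bool.eq_false_iff]
        intro hc
        exact hall (hiff.mp hc).1

-- ===== VERDICT (by name: the statement is the Claim_ definition above) =====
theorem has_pytorch_bin_files_spec : Claim_equal_has_pytorch_bin_files := by
  intro file_list _
  unfold Spec_has_pytorch_bin_files
  exact pv_ports_eq file_list
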